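-- pv_equiv track=rewrite | github.com/ihep-platform/ihep.app | data/fhir-mappings/epic_to_ihep.py | _normalize_name_case
-- ===== SOURCE A (Python) =====
-- def _normalize_name_case(name: str) -> str:
--     """Normalize name casing from ALL CAPS or other irregular formats.
--
--     Converts 'SMITH' to 'Smith', preserves hyphenated names like
--     'JONES-SMITH' -> 'Jones-Smith', and handles apostrophes like
--     'O'BRIEN' -> 'O'Brien'.
--     """
--     if not name:
--         return name
--     # If the name is all uppercase, convert to title case
--     if name.isupper():
--         # Handle hyphenated names
--         parts = name.split("-")
--         titled_parts = []
--         for part in parts: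
--             # Handle apostrophes (O'Brien, McDonald, etc.)
--             if "'" in part:
--                 sub_parts = part.split("'")
--                 titled_parts.append(
--                     "'".join(sp.capitalize() for sp in sub_parts)
--                 )
--             else:
--                 titled_parts.append(part.capitalize())
--         return "-".join(titled_parts)
--     return name
-- ===== SOURCE B (Python) =====
-- def _normalize_name_case(name: str) -> str:
--     """Single left-to-right character pass instead of split/capitalize/join."""
--     if not name:
--         return name
--     if not name.isupper():
--         return name
--     out = []
--     at_word_start = True
--     for ch in name:
--         if ch == "-" or ch == "'":
--             out.append(ch)
--             at_word_start = True
--         else: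
--             out.append(ch.upper() if at_word_start else ch.lower())
--             at_word_start = False
--     return "".join(out)
-- ===== Notes on version B (the rewrite author's own statement) =====
-- stated objective: alternative
-- what changed: Replaces the split-on-hyphen / split-on-apostrophe / capitalize-and-join body with a single left-to-right character pass that tracks a word-start flag reset by hyphens and apostrophes.
import Mathlib
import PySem

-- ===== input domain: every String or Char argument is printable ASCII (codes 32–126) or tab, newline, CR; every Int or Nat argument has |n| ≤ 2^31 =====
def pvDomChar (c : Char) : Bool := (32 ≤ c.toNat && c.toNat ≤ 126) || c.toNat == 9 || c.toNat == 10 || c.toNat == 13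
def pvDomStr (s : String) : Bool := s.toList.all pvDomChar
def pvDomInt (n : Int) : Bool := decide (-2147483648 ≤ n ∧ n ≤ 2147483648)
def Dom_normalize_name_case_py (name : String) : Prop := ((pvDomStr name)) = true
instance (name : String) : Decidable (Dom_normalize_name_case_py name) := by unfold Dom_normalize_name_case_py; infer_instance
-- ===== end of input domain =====

-- B replaces A's split-on-hyphen / split-on-apostrophe / capitalize-and-join body with one left-to-right
-- character pass keeping a word-start flag reset at hyphens and apostrophes (objective: alternative decomposition, same cost).

-- ===== PORT A =====
-- str.isupper(): at least one cased char and no lowercase cased char — exact on the ASCII domain,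
-- where the cased characters are exactly the letters (shared primitive, used by both ports' guard).
def pyStrIsupper (cs : List Char) : Bool :=
  cs.any PySem.Chars.isupper && !(cs.any PySem.Chars.islower)

-- str.capitalize(): first char uppercased, rest lowercased — exact on ASCII (no title-case deltas).
def pyCapitalize : List Char → List Char
  | [] => []
  | c :: r => PySem.Chars.upperChar c :: r.map PySem.Chars.lowerChar

def normalize_name_case_py (name : String) : String :=
  if name = "" then name
  else if pyStrIsupper name.toList then
    String.ofList (PySem.Chars.join ['-']
      ((PySem.Chars.splitOn name.toList ['-']).foldl (fun acc part =>
        if PySem.Chars.isIn ['\''] part then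
          acc ++ [PySem.Chars.join ['\''] ((PySem.Chars.splitOn part ['\'']).map pyCapitalize)]
        else acc ++ [pyCapitalize part]) []))
  else name

-- ===== PORT B =====
def normalize_name_case_py_alt (name : String) : String :=
  if name = "" then name
  else if !(pyStrIsupper name.toList) then name
  else
    String.ofList ((name.toList.foldl (fun (st : List Char × Bool) ch =>
      if ch = '-' ∨ ch = '\'' then (st.1 ++ [ch], true)
      else (st.1 ++ [if st.2 then PySem.Chars.upperChar ch else PySem.Chars.lowerChar ch], false))
      (([] : List Char), true)).1)

-- ===== PRECONDITION & SPEC =====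
def Spec_normalize_name_case_py (name : String) (out : String) : Prop := out = normalize_name_case_py_alt name
instance (name : String) (out : String) : Decidable (Spec_normalize_name_case_py name out) := by unfold Spec_normalize_name_case_py; infer_instance

-- ===== CLAIM (what is proved, stated in full; the proofs are below) =====
def Claim_equal_normalize_name_case_py : Prop := ∀ (name : String), Dom_normalize_name_case_py name → Spec_normalize_name_case_py name (normalize_name_case_py name)

-- ===== LEMMAS AND PROOFS =====

-- a direct structural characterisation of split on a single-character separator
def splitD (d : Char) : List Char → List (List Char)
  | [] => [[]]
  | c :: cs =>
      if c = d then [] :: splitD d cs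
      else match splitD d cs with
        | [] => [[c]]
        | h :: t => (c :: h) :: t

theorem splitD_cons (d c : Char) (cs : List Char) :
    splitD d (c :: cs) =
      if c = d then [] :: splitD d cs
      else match splitD d cs with
        | [] => [[c]]
        | h :: t => (c :: h) :: t := rfl

theorem splitD_exists_cons (d : Char) (cs : List Char) :
    ∃ h t, splitD d cs = h :: t := by
  cases cs with
  | nil => exact ⟨[], [], rfl⟩
  | cons c cs =>
    rw [splitD_cons]
    split
    · exact ⟨_, _, rfl⟩
    · rcases h : splitD d cs with _ | ⟨h', t'⟩ <;> exact ⟨_, _, rfl⟩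

def consHead (pre : List Char) : List (List Char) → List (List Char)
  | [] => []
  | h :: t => (pre ++ h) :: t

theorem splitOn_go_spec (d : Char) :
    ∀ (fuel : Nat) (l cur : List Char) (acc : List (List Char)), l.length < fuel →
      PySem.Chars.splitOn.go [d] fuel l cur acc = acc.reverse ++ consHead cur.reverse (splitD d l) := by
  intro fuel
  induction fuel with
  | zero => intro l cur acc h; omega
  | succ n ih =>
    intro l cur acc h
    cases l with
    | nil =>
      show (cur.reverse :: acc).reverse = acc.reverse ++ consHead cur.reverse (splitD d [])
      simp [splitD, consHead]
    | cons c rest =>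
      have estep : PySem.Chars.splitOn.go [d] (n+1) (c :: rest) cur acc =
          if ([d]).isPrefixOf (c :: rest) then
            PySem.Chars.splitOn.go [d] n (List.drop 1 (c :: rest)) [] (cur.reverse :: acc)
          else PySem.Chars.splitOn.go [d] n rest (c :: cur) acc := rfl
      have epre : ([d]).isPrefixOf (c :: rest) = (d == c) := by simp [List.isPrefixOf]
      have hlt : rest.length < n := by simpa using Nat.lt_of_succ_lt_succ h
      rw [estep, epre]
      obtain ⟨hh, tt, hs⟩ := splitD_exists_cons d rest
      by_cases hc : c = d
      · subst hc
        rw [if_pos (by simp), List.drop_one, List.tail_cons, ih rest [] (cur.reverse :: acc) hlt]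
        rw [show splitD c (c :: rest) = [] :: splitD c rest by rw [splitD_cons, if_pos rfl]]
        rw [List.reverse_cons, hs]
        simp [consHead]
      · rw [if_neg (by simp [beq_iff_eq]; exact Ne.symm hc), ih rest (c :: cur) acc hlt]
        have e : splitD d (c :: rest) = (c :: hh) :: tt := by
          rw [splitD_cons, if_neg hc, hs]
        rw [e, hs]
        simp [consHead]

theorem splitOn_eq_splitD (d : Char) (cs : List Char) :
    PySem.Chars.splitOn cs [d] = splitD d cs := by
  rw [show PySem.Chars.splitOn cs [d] = PySem.Chars.splitOn.go [d] (cs.length + 1) cs [] [] from rfl,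
    splitOn_go_spec d (cs.length + 1) cs [] [] (by omega)]
  obtain ⟨h, t, hs⟩ := splitD_exists_cons d cs
  simp [consHead, hs]

theorem splitD_of_not_mem {d : Char} {cs : List Char} (h : d ∉ cs) : splitD d cs = [cs] := by
  induction cs with
  | nil => rfl
  | cons c cs ih =>
    simp only [List.mem_cons, not_or] at h
    simp [splitD_cons, Ne.symm h.1, ih h.2]

theorem join_cons_head (sep x a : List Char) (t : List (List Char)) :
    PySem.Chars.join sep ((x ++ a) :: t) = x ++ PySem.Chars.join sep (a :: t) := by
  cases t with
  | nil => simp [PySem.Chars.join_singleton]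
  | cons b t => simp [PySem.Chars.join_cons_cons]

-- B's purified loop
def go2 : List Char → Bool → List Char
  | [], _ => []
  | c :: cs, ws =>
      if c = '-' ∨ c = '\'' then c :: go2 cs true
      else (if ws then PySem.Chars.upperChar c else PySem.Chars.lowerChar c) :: go2 cs false

theorem b_foldl_eq_go2 (cs : List Char) : ∀ (acc : List Char) (ws : Bool),
    (cs.foldl (fun (st : List Char × Bool) ch =>
      if ch = '-' ∨ ch = '\'' then (st.1 ++ [ch], true)
      else (st.1 ++ [if st.2 then PySem.Chars.upperChar ch else PySem.Chars.lowerChar ch], false))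
      (acc, ws)).1 = acc ++ go2 cs ws := by
  induction cs with
  | nil => intro acc ws; simp [go2]
  | cons c cs ih =>
    intro acc ws
    by_cases hc : c = '-' ∨ c = '\''
    · simp [go2, hc, ih]
    · simp [go2, hc, ih]

-- capitalisation of the first sub-chunk depending on the word-start flag
def capAt (ws : Bool) (l : List Char) : List Char :=
  if ws then pyCapitalize l else l.map PySem.Chars.lowerChar

def gfun (p : List Char) : List Char :=
  PySem.Chars.join ['\''] ((splitD '\'' p).map pyCapitalize)

def gW (ws : Bool) (p : List Char) : List Char :=
  match splitD '\'' p with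
  | [] => []
  | h :: t => PySem.Chars.join ['\''] (capAt ws h :: t.map pyCapitalize)

def AW (ws : Bool) (cs : List Char) : List Char :=
  match splitD '-' cs with
  | [] => []
  | h :: t => PySem.Chars.join ['-'] (gW ws h :: t.map gfun)

theorem gW_true (p : List Char) : gW true p = gfun p := by
  obtain ⟨h, t, hs⟩ := splitD_exists_cons '\'' p
  simp [gW, gfun, hs, capAt]

theorem gW_nil (ws : Bool) : gW ws [] = [] := by
  cases ws <;> rfl

theorem gW_cons_apo (ws : Bool) (h : List Char) : gW ws ('\'' :: h) = '\'' :: gfun h := by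
  obtain ⟨h2, t2, hs2⟩ := splitD_exists_cons '\'' h
  have e : splitD '\'' ('\'' :: h) = [] :: h2 :: t2 := by rw [splitD_cons]; simp [hs2]
  have ecap : capAt ws [] = [] := by cases ws <;> rfl
  simp only [gW, e, ecap, List.map_cons]
  rw [PySem.Chars.join_cons_cons]
  simp [gfun, hs2]

theorem gW_cons_ord (ws : Bool) (c : Char) (h : List Char) (hapo : c ≠ '\'') :
    gW ws (c :: h) =
      (if ws then PySem.Chars.upperChar c else PySem.Chars.lowerChar c) :: gW false h := by
  obtain ⟨h2, t2, hs2⟩ := splitD_exists_cons '\'' h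
  have e : splitD '\'' (c :: h) = (c :: h2) :: t2 := by rw [splitD_cons]; simp [hapo, hs2]
  have ecap : capAt ws (c :: h2) =
      (if ws then PySem.Chars.upperChar c else PySem.Chars.lowerChar c) :: capAt false h2 := by
    cases ws <;> simp [capAt, pyCapitalize]
  simp only [gW, e, hs2, ecap]
  rw [show ((if ws then PySem.Chars.upperChar c else PySem.Chars.lowerChar c) :: capAt false h2)
      = [if ws then PySem.Chars.upperChar c else PySem.Chars.lowerChar c] ++ capAt false h2 from rfl,
    join_cons_head]
  rfl

theorem AW_eq_go2 (cs : List Char) : ∀ ws, AW ws cs = go2 cs ws := by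
  induction cs with
  | nil => intro ws; cases ws <;> rfl
  | cons c cs ih =>
    intro ws
    obtain ⟨h, t, hs⟩ := splitD_exists_cons '-' cs
    by_cases hdash : c = '-'
    · subst hdash
      have e : splitD '-' ('-' :: cs) = [] :: h :: t := by rw [splitD_cons]; simp [hs]
      simp only [AW, e, gW_nil, List.map_cons]
      rw [PySem.Chars.join_cons_cons]
      simp only [List.nil_append, List.singleton_append, go2, true_or, if_pos]
      rw [← ih true]
      simp [AW, hs, gW_true]
    · have e : splitD '-' (c :: cs) = (c :: h) :: t := by rw [splitD_cons]; simp [hdash, hs]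
      by_cases hapo : c = '\''
      · subst hapo
        simp only [AW, e, gW_cons_apo]
        rw [show ('\'' :: gfun h) = ['\''] ++ gfun h from rfl, join_cons_head]
        simp only [List.singleton_append, go2, or_true, if_pos]
        rw [← ih true]
        simp [AW, hs, gW_true]
      · simp only [AW, e, gW_cons_ord ws c h hapo]
        rw [show ((if ws then PySem.Chars.upperChar c else PySem.Chars.lowerChar c) :: gW false h)
            = [if ws then PySem.Chars.upperChar c else PySem.Chars.lowerChar c] ++ gW false h from rfl,
          join_cons_head]
        simp only [List.singleton_append, go2, hdash, hapo, or_self]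
        rw [← ih false]
        simp [AW, hs]

theorem a_branch_eq_gfun (part : List Char) :
    (if PySem.Chars.isIn ['\''] part then
      PySem.Chars.join ['\''] ((PySem.Chars.splitOn part ['\'']).map pyCapitalize)
    else pyCapitalize part) = gfun part := by
  by_cases hin : PySem.Chars.isIn ['\''] part = true
  · simp [hin, gfun, splitOn_eq_splitD]
  · have hmem : '\'' ∉ part := by
      have := (PySem.Chars.isIn_eq_false_iff ['\''] part).mp (by simpa using hin)
      simpa [List.singleton_infix_iff] using this
    simp [hin, gfun, splitD_of_not_mem hmem, PySem.Chars.join_singleton]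

-- ===== VERDICT (by name: the statement is the Claim_ definition above) =====
theorem normalize_name_case_py_spec : Claim_equal_normalize_name_case_py := by
  intro name _
  unfold Spec_normalize_name_case_py normalize_name_case_py normalize_name_case_py_alt
  by_cases h0 : name = ""
  · simp [h0]
  · by_cases hup : pyStrIsupper name.toList = true
    · simp only [h0, if_neg, hup, Bool.not_true, if_pos, Bool.false_eq_true, not_false_iff]
      congr 1
      rw [b_foldl_eq_go2, List.nil_append, ← AW_eq_go2]
      have hfold : ((PySem.Chars.splitOn name.toList ['-']).foldl (fun acc part =>
          if PySem.Chars.isIn ['\''] part then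
            acc ++ [PySem.Chars.join ['\''] ((PySem.Chars.splitOn part ['\'']).map pyCapitalize)]
          else acc ++ [pyCapitalize part]) []) = (splitD '-' name.toList).map gfun := by
        rw [splitOn_eq_splitD]
        have hfun : (fun (acc : List (List Char)) part =>
            if PySem.Chars.isIn ['\''] part then
              acc ++ [PySem.Chars.join ['\''] ((PySem.Chars.splitOn part ['\'']).map pyCapitalize)]
            else acc ++ [pyCapitalize part]) = fun acc part => acc ++ [gfun part] := by
          funext acc part
          rw [← a_branch_eq_gfun part]
          split <;> rfl
        rw [hfun, PySem.List.foldl_append_singleton_eq_map, List.nil_append]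
      rw [hfold]
      obtain ⟨h, t, hs⟩ := splitD_exists_cons '-' name.toList
      simp [AW, hs, gW_true]
    · simp [h0, hup]
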